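-- pv_equiv track=rewrite | github.com/gladstone-institutes/bibliometrics | src/pubmednet.py | _encode_int
-- ===== SOURCE A (Python) =====
-- def _encode_int(num):
--   letters = 'abcdefghijklmnopqrstuvwxyz'
--   nletters = len(letters)
--
--   if 0 <= num and num < nletters:
--     return letters[num]
--
--   s = ''
--   while num != 0:
--     num, i = divmod(num, nletters)
--     s = letters[i] + s
--   return s
-- ===== SOURCE B (Python) =====
-- def _encode_int(num):
--   letters = 'abcdefghijklmnopqrstuvwxyz'
--   if 0 <= num < len(letters):
--     return letters[num]
--   q, r = divmod(num, len(letters))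
--   return _encode_int(q) + letters[r]
-- ===== Notes on version B (the rewrite author's own statement) =====
-- stated objective: simpler
-- what changed: Replaces the iterative divmod loop that prepends digits to an accumulator string with a direct recursive base-26 conversion that computes the high-order digits by a recursive call and appends the low digit.
import Mathlib
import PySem

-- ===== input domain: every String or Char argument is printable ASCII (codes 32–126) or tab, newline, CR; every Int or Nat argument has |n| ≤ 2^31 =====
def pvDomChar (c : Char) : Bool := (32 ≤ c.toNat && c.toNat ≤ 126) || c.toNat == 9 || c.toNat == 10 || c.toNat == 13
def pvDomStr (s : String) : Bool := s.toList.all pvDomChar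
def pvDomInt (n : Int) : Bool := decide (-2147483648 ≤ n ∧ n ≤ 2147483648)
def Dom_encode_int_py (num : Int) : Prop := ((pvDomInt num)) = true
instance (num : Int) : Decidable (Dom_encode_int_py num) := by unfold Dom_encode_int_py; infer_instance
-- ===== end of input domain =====

-- B replaces A's iterative prepend loop with a direct recursive base-26 conversion (simpler decomposition).

-- ===== PORT A =====
def pvLetters : List Char :=
  ['a','b','c','d','e','f','g','h','i','j','k','l','m',
   'n','o','p','q','r','s','t','u','v','w','x','y','z']

-- the while loop of A; Python's 'while num != 0' never terminates for num < 0, and the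
-- fuel counter is only a totality guard: num shrinks by //26 each step, so num.toNat + 1
-- fuel is always enough when 0 ≤ num (proved in pvLoopA_fuel below)
def pvLoopA : Nat → Int → List Char → List Char
  | 0, _, s => s
  | fuel + 1, num, s =>
    if 0 < num then
      pvLoopA fuel (PySem.Int.floordiv num 26)
        (((PySem.List.pyGet? pvLetters (PySem.Int.mod num 26)).getD 'a') :: s)
    else s

def encode_int_py (num : Int) : String :=
  let nletters : Int := pvLetters.length
  if 0 ≤ num ∧ num < nletters then
    String.ofList [(PySem.List.pyGet? pvLetters num).getD 'a']
  else String.ofList (pvLoopA (num.toNat + 1) num [])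

-- ===== PORT B =====
-- Python B recurses infinitely on num < 0 (outside Pre_); fuel is only a totality guard
def pvAltAux : Nat → Int → List Char
  | 0, _ => []
  | fuel + 1, num =>
    if 0 ≤ num ∧ num < (pvLetters.length : Int) then
      [(PySem.List.pyGet? pvLetters num).getD 'a']
    else if num ≤ 0 then []
    else
      pvAltAux fuel (PySem.Int.floordiv num 26) ++
        [(PySem.List.pyGet? pvLetters (PySem.Int.mod num 26)).getD 'a']

def encode_int_py_alt (num : Int) : String := String.ofList (pvAltAux (num.toNat + 1) num)

-- ===== PRECONDITION & SPEC =====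
-- Pre_ excludes num < 0, on which Python A's while loop never terminates (divmod on a
-- negative keeps the quotient negative forever), so A returns on exactly 0 ≤ num.
def Pre_encode_int_py (num : Int) : Prop := 0 ≤ num
instance (num : Int) : Decidable (Pre_encode_int_py num) := by unfold Pre_encode_int_py; infer_instance
def pvWitness_encode_int_py : Int := (702)

def Spec_encode_int_py (num : Int) (out : String) : Prop := out = encode_int_py_alt num
instance (num : Int) (out : String) : Decidable (Spec_encode_int_py num out) := by unfold Spec_encode_int_py; infer_instance

-- ===== CLAIM (what is proved, stated in full; the proofs are below) =====
def Claim_equal_encode_int_py : Prop := ∀ (num : Int), Dom_encode_int_py num → Pre_encode_int_py num → Spec_encode_int_py num (encode_int_py num)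

-- ===== LEMMAS AND PROOFS =====
lemma pvLetters_len : (pvLetters.length : Int) = 26 := by decide

-- with enough fuel on both sides, A's loop produces B's digits followed by the accumulator
lemma pvLoopA_eq_altAux :
    ∀ (f1 : Nat), ∀ (num : Int) (f2 : Nat) (s : List Char),
      0 < num → num.toNat ≤ f1 → num.toNat ≤ f2 →
      pvLoopA f1 num s = pvAltAux f2 num ++ s := by
  intro f1
  induction f1 with
  | zero => intro num _ _ hpos h1 _; omega
  | succ f ih =>
    intro num f2 s hpos h1 h2
    have h26 : PySem.Int.floordiv num 26 = num / 26 :=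
      PySem.Int.floordiv_eq_ediv_of_pos (by decide)
    obtain ⟨f2', rfl⟩ : ∃ k, f2 = k + 1 := ⟨f2 - 1, by omega⟩
    rw [pvLoopA]
    simp only [hpos, if_pos]
    by_cases hq : 0 < PySem.Int.floordiv num 26
    · have hge : 26 ≤ num := by rw [h26] at hq; omega
      rw [ih _ f2' _ hq (by rw [h26]; omega) (by rw [h26]; omega)]
      conv_rhs => rw [pvAltAux]
      have hA : ¬ (0 ≤ num ∧ num < (pvLetters.length : Int)) := by
        rw [pvLetters_len]; omega
      have hB : ¬ num ≤ 0 := by omega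
      simp only [hA, if_false, hB, List.append_assoc, List.singleton_append]
    · have hlt : num < 26 := by rw [h26] at hq; omega
      have hstop : ∀ (f' : Nat) (s' : List Char),
          pvLoopA f' (PySem.Int.floordiv num 26) s' = s' := by
        intro f' s'
        cases f' with
        | zero => rfl
        | succ k => rw [pvLoopA]; simp only [hq, if_false]
      rw [hstop]
      conv_rhs => rw [pvAltAux]
      have hA : (0 ≤ num ∧ num < (pvLetters.length : Int)) := by
        rw [pvLetters_len]; exact ⟨le_of_lt hpos, hlt⟩
      have hmod : PySem.Int.mod num 26 = num := by
        rw [PySem.Int.mod_eq_emod_of_pos (by decide : (0:Int) < 26)]; omega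
      rw [hmod, if_pos hA]
      simp

-- ===== VERDICT (by name: the statement is the Claim_ definition above) =====
theorem encode_int_py_spec : Claim_equal_encode_int_py := by
  intro num _ hpre
  unfold Spec_encode_int_py encode_int_py encode_int_py_alt
  simp only [pvLetters_len]
  by_cases hsmall : 0 ≤ num ∧ num < 26
  · rw [if_pos hsmall, pvAltAux]
    simp only [pvLetters_len]
    rw [if_pos hsmall]
  · have hpos : 0 < num := by
      rcases not_and_or.mp hsmall with h | h
      · exact absurd hpre h
      · omega
    rw [if_neg hsmall,
        pvLoopA_eq_altAux (num.toNat + 1) num (num.toNat + 1) [] hpos (by omega) (by omega)]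
    simp
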